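-- pv_equiv track=rewrite | github.com/dsparber/CIS-521 | hw2/homework2.py | solve_disks
-- ===== SOURCE A (Python) =====
-- def solve_disks(length, num_disks, distinct):
--
--     initial = tuple([(x if distinct else 1) if x < num_disks else -1 for x in range(length)])
--     goal = initial[::-1]
--
--     def get_neighbors(cells):
--         neighbors = []
--         for index, cell in enumerate(cells):
--             if cell >= 0:
--                 # move right
--                 if index + 1 < length and cells[index + 1] == -1:
--                     copy = list(cells)
--                     copy[index] = -1
--                     copy[index + 1] = cell
--                     neighbors.append(((index, index + 1), tuple(copy)))
--                 # move left
--                 if index >= 1 and cells[index - 1] == -1: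
--                     copy = list(cells)
--                     copy[index] = -1
--                     copy[index - 1] = cell
--                     neighbors.append(((index, index - 1), tuple(copy)))
--                 # jump right
--                 if index + 2 < length and cells[index + 1] != -1 and cells[index + 2] == -1:
--                     copy = list(cells)
--                     copy[index] = -1
--                     copy[index + 2] = cell
--                     neighbors.append(((index, index + 2), tuple(copy)))
--                 # jump left
--                 if index >= 2 and cells[index - 1] != -1 and cells[index - 2] == -1:
--                     copy = list(cells)
--                     copy[index] = -1
--                     copy[index - 2] = cell
--                     neighbors.append(((index, index - 2), tuple(copy)))
--
--         return neighbors
--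
--     queue = [initial]
--     moves = dict()
--     moves[initial] = []
--
--     while queue:
--         current = queue.pop()
--
--         if current == goal:
--             return moves[current]
--
--         for move, neighbor in get_neighbors(current):
--             if neighbor not in moves:
--                 moves[neighbor] = moves[current] + [move]
--                 queue.insert(0, neighbor)
-- ===== SOURCE B (Python) =====
-- from collections import deque
--
-- def solve_disks(length, num_disks, distinct):
--     initial = tuple((x if distinct else 1) if x < num_disks else -1 for x in range(length))
--     goal = initial[::-1]
--
--     def try_move(cells, i, d):
--         j = i + d
--         if j < 0 or j >= length or cells[j] != -1:
--             return None
--         if (d == 2 or d == -2) and cells[(i + j) // 2] == -1: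
--             return None
--         copy = list(cells)
--         copy[i] = -1
--         copy[j] = cells[i]
--         return tuple(copy)
--
--     queue = deque([initial])
--     came_from = {}
--     while queue:
--         current = queue.popleft()
--         if current == goal:
--             path = []
--             state = current
--             while state != initial:
--                 parent, move = came_from[state]
--                 path.append(move)
--                 state = parent
--             path.reverse()
--             return path
--         for i in range(length):
--             if current[i] < 0:
--                 continue
--             for d in (1, -1, 2, -2):
--                 neighbor = try_move(current, i, d)
--                 if neighbor is not None and neighbor not in came_from and neighbor != initial:
--                     came_from[neighbor] = (current, (i, i + d))
--                     queue.append(neighbor)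
-- ===== Notes on version B (the rewrite author's own statement) =====
-- stated objective: alternative
-- what changed: A's BFS stores the full move list for every discovered state (copied on each discovery) and does O(n) queue.insert(0, ...); B keeps a deque plus a parent-pointer map (came_from[neighbor] = (parent, move)) and reconstructs the answer only once, by walking back from the goal and reversing.
-- outside the precondition, e.g. on solve_disks(2, 2, True): A returns None, B returns None; on solve_disks(3, 4, True): A returns None, B returns None
import Mathlib
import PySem

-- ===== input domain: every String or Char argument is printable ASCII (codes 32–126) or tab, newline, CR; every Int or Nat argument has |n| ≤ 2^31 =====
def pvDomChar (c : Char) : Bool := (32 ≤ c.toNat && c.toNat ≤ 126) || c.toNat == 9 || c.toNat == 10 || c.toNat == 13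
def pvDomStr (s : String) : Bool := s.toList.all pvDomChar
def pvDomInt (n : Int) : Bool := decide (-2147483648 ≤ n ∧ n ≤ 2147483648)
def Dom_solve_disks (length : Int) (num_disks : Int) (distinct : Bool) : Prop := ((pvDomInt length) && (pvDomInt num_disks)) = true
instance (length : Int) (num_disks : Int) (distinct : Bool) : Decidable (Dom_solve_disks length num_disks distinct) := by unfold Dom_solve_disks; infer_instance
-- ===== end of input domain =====

-- B replaces A's per-state full-path dictionary (moves[s] = whole move list, copied on every
-- discovery) and O(n) queue.insert(0, ·) by a deque plus a parent-pointer map with path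
-- reconstruction at the goal; objective: alternative (leaner bookkeeping), same BFS order.

-- ===== PORT A =====
-- initial = tuple([(x if distinct else 1) if x < num_disks else -1 for x in range(length)])
def pvInitialA (length num_disks : Int) (distinct : Bool) : List Int :=
  (PySem.List.pyRange 0 length).map (fun x => if x < num_disks then (if distinct then x else 1) else -1)

-- def get_neighbors(cells): the enumerate loop with four conditional appends
def pvGetNeighborsA (length : Int) (cells : List Int) : List ((Int × Int) × List Int) :=
  (PySem.List.enumerate cells).foldl (fun neighbors p =>
    let index := p.1
    let cell := p.2
    if 0 ≤ cell then
      -- move right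
      let neighbors := if index + 1 < length ∧ PySem.List.pyGetD cells (index + 1) 0 = -1 then
        neighbors ++ [((index, index + 1), PySem.List.pySetD (PySem.List.pySetD cells index (-1)) (index + 1) cell)] else neighbors
      -- move left
      let neighbors := if 1 ≤ index ∧ PySem.List.pyGetD cells (index - 1) 0 = -1 then
        neighbors ++ [((index, index - 1), PySem.List.pySetD (PySem.List.pySetD cells index (-1)) (index - 1) cell)] else neighbors
      -- jump right
      let neighbors := if index + 2 < length ∧ PySem.List.pyGetD cells (index + 1) 0 ≠ -1 ∧ PySem.List.pyGetD cells (index + 2) 0 = -1 then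
        neighbors ++ [((index, index + 2), PySem.List.pySetD (PySem.List.pySetD cells index (-1)) (index + 2) cell)] else neighbors
      -- jump left
      let neighbors := if 2 ≤ index ∧ PySem.List.pyGetD cells (index - 1) 0 ≠ -1 ∧ PySem.List.pyGetD cells (index - 2) 0 = -1 then
        neighbors ++ [((index, index - 2), PySem.List.pySetD (PySem.List.pySetD cells index (-1)) (index - 2) cell)] else neighbors
      neighbors
    else neighbors) []

-- fuel for the while loop: each iteration pops one queue entry, and entries are enqueued at most
-- once per distinct state; 2^((length+2)*(log2(length+2)+1)) ≥ (length+2)^length bounds the number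
-- of states, so this fuel is never exhausted on a run the Python completes (shift: cheap to evaluate)
def pvFuelA (length : Int) : Nat :=
  Nat.shiftLeft 1 ((length.toNat + 2) * (Nat.log2 (length.toNat + 2) + 1)) + 2

-- while queue: current = queue.pop(); ... (moves[current] is always present: current was enqueued
-- only together with its moves entry, so getD's default is never taken)
def pvLoopA (length : Int) (goal : List Int) :
    Nat → List (List Int) → PySem.Dict (List Int) (List (Int × Int)) → Option (List (Int × Int))
  | 0, _, _ => none
  | fuel + 1, queue, moves =>
    match PySem.List.pop? queue with
    | none => none   -- queue empty: while exits, Python returns None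
    | some (current, rest) =>
      if current == goal then some (moves.getD current [])
      else
        let st := (pvGetNeighborsA length current).foldl (fun st mn =>
          if st.2.contains mn.2 = false then
            (PySem.List.insert st.1 0 mn.2, st.2.insert mn.2 (st.2.getD current [] ++ [mn.1]))
          else st) (rest, moves)
        pvLoopA length goal fuel st.1 st.2

def solve_disks (length : Int) (num_disks : Int) (distinct : Bool) : List (Int × Int) :=
  let initial := pvInitialA length num_disks distinct
  let goal := initial.reverse   -- initial[::-1] = reverse (exact: PySem.List.slice?_none_none_neg_one)
  (pvLoopA length goal (pvFuelA length) [initial] (PySem.Dict.empty.insert initial [])).getD []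
  -- Python returns None when the queue empties (unsolvable input); those inputs are outside Pre_

-- ===== PORT B =====
def pvInitialB (length num_disks : Int) (distinct : Bool) : List Int :=
  (PySem.List.pyRange 0 length).map (fun x => if x < num_disks then (if distinct then x else 1) else -1)

-- def try_move(cells, i, d)
def pvTryMove (length : Int) (cells : List Int) (i d : Int) : Option (List Int) :=
  let j := i + d
  if j < 0 ∨ length ≤ j ∨ PySem.List.pyGetD cells j 0 ≠ -1 then none
  else if (d = 2 ∨ d = -2) ∧ PySem.List.pyGetD cells (PySem.Int.floordiv (i + j) 2) 0 = -1 then none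
  else some (PySem.List.pySetD (PySem.List.pySetD cells i (-1)) j (PySem.List.pyGetD cells i 0))

-- the path-reconstruction while loop; fuel cf.size + 1 suffices: each step follows a parent
-- pointer to a strictly shorter stored path (proved below); cf.get? never misses on Pre_ inputs
def pvBacktrack (initial : List Int) (cf : PySem.Dict (List Int) (List Int × (Int × Int))) :
    Nat → List Int → List (Int × Int) → List (Int × Int)
  | 0, _, path => path.reverse
  | fuel + 1, state, path =>
    if state == initial then path.reverse
    else
      match cf.get? state with
      | some pm => pvBacktrack initial cf fuel pm.1 (path ++ [pm.2])
      | none => path.reverse   -- unreachable: every non-initial discovered state has a parent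

def pvFuelB (length : Int) : Nat :=
  Nat.shiftLeft 1 ((length.toNat + 2) * (Nat.log2 (length.toNat + 2) + 1)) + 2

def pvLoopB (length : Int) (initial goal : List Int) :
    Nat → List (List Int) → PySem.Dict (List Int) (List Int × (Int × Int)) → Option (List (Int × Int))
  | 0, _, _ => none
  | fuel + 1, queue, cf =>
    match queue with
    | [] => none   -- queue empty: while exits, Python returns None
    | current :: rest =>   -- current = queue.popleft()
      if current == goal then some (pvBacktrack initial cf (cf.size + 1) current [])
      else
        let st := (PySem.List.pyRange 0 length).foldl (fun st i =>
          if PySem.List.pyGetD current i 0 < 0 then st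
          else [(1 : Int), -1, 2, -2].foldl (fun st d =>
            match pvTryMove length current i d with
            | none => st
            | some neighbor =>
              if st.2.contains neighbor = false ∧ neighbor ≠ initial then
                (st.1 ++ [neighbor], st.2.insert neighbor (current, (i, i + d)))
              else st) st) (rest, cf)
        pvLoopB length initial goal fuel st.1 st.2

def solve_disks_alt (length : Int) (num_disks : Int) (distinct : Bool) : List (Int × Int) :=
  let initial := pvInitialB length num_disks distinct
  let goal := initial.reverse   -- initial[::-1] = reverse (exact: PySem.List.slice?_none_none_neg_one)
  (pvLoopB length initial goal (pvFuelB length) [initial] PySem.Dict.empty).getD []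

-- ===== PRECONDITION & SPEC =====
-- Pre_ excludes exactly the unsolvable puzzles (distinct disks filling every cell of a board of
-- length ≥ 2, plus impossible over-full distinct boards), on which Python A returns None — not a
-- value of the declared list type; B returns None there too.
def Pre_solve_disks (length : Int) (num_disks : Int) (distinct : Bool) : Prop :=
  ¬ (distinct = true ∧ 2 ≤ length ∧ length ≤ num_disks)
instance (length : Int) (num_disks : Int) (distinct : Bool) : Decidable (Pre_solve_disks length num_disks distinct) := by
  unfold Pre_solve_disks; infer_instance

def pvWitness_solve_disks : Int × Int × Bool := (4, 2, true)

def Spec_solve_disks (length : Int) (num_disks : Int) (distinct : Bool) (out : List (Int × Int)) : Prop := out = solve_disks_alt length num_disks distinct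
instance (length : Int) (num_disks : Int) (distinct : Bool) (out : List (Int × Int)) : Decidable (Spec_solve_disks length num_disks distinct out) := by unfold Spec_solve_disks; infer_instance

-- ===== CLAIM (what is proved, stated in full; the proofs are below) =====
def Claim_equal_solve_disks : Prop := ∀ (length : Int) (num_disks : Int) (distinct : Bool), Dom_solve_disks length num_disks distinct → Pre_solve_disks length num_disks distinct → Spec_solve_disks length num_disks distinct (solve_disks length num_disks distinct)

-- ===== LEMMAS AND PROOFS =====

-- A's loop-body step on (queue, moves), processing one (move, neighbor) pair
def pvStepA (current : List Int) (st : List (List Int) × PySem.Dict (List Int) (List (Int × Int)))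
    (mn : (Int × Int) × List Int) : List (List Int) × PySem.Dict (List Int) (List (Int × Int)) :=
  if st.2.contains mn.2 = false then
    (PySem.List.insert st.1 0 mn.2, st.2.insert mn.2 (st.2.getD current [] ++ [mn.1]))
  else st

-- B's loop-body step on (queue, came_from)
def pvStepB (initial current : List Int) (st : List (List Int) × PySem.Dict (List Int) (List Int × (Int × Int)))
    (mn : (Int × Int) × List Int) : List (List Int) × PySem.Dict (List Int) (List Int × (Int × Int)) :=
  if st.2.contains mn.2 = false ∧ mn.2 ≠ initial then
    (st.1 ++ [mn.2], st.2.insert mn.2 (current, mn.1))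
  else st

def pvCands (length : Int) (cells : List Int) (i : Int) : List ((Int × Int) × List Int) :=
  [(1 : Int), -1, 2, -2].filterMap (fun d => (pvTryMove length cells i d).map (fun nb => ((i, i + d), nb)))

def pvCandsAll (length : Int) (cells : List Int) : List ((Int × Int) × List Int) :=
  (PySem.List.pyRange 0 (cells.length : Int)).flatMap
    (fun i => if 0 ≤ PySem.List.pyGetD cells i 0 then pvCands length cells i else [])

-- the simulation invariant between A's moves dict and B's came_from dict
def pvInv (initial : List Int) (mA : PySem.Dict (List Int) (List (Int × Int)))
    (cf : PySem.Dict (List Int) (List Int × (Int × Int))) : Prop :=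
  mA.get? initial = some []
  ∧ (∀ s, mA.contains s = true ↔ (s = initial ∨ cf.contains s = true))
  ∧ (∀ s pm, cf.get? s = some pm → ∃ pl, mA.get? pm.1 = some pl ∧ mA.get? s = some (pl ++ [pm.2]))
  ∧ (∀ s pl, mA.get? s = some pl → pl.length ≤ cf.size)

def pvQInv (ℓ : Nat) (mA : PySem.Dict (List Int) (List (Int × Int))) (q : List (List Int)) : Prop :=
  ∀ s ∈ q, mA.contains s = true ∧ s.length = ℓ

theorem pvInsert_zero {α : Type} (xs : List α) (v : α) : PySem.List.insert xs 0 v = v :: xs := by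
  simp [PySem.List.insert, PySem.List.sliceIndices]

theorem pvTryMove_len (length : Int) (cells : List Int) (i d : Int) (nb : List Int)
    (h : pvTryMove length cells i d = some nb) : nb.length = cells.length := by
  unfold pvTryMove at h
  have h' : (if i + d < 0 ∨ length ≤ i + d ∨ PySem.List.pyGetD cells (i + d) 0 ≠ -1 then none
      else if (d = 2 ∨ d = -2) ∧ PySem.List.pyGetD cells (PySem.Int.floordiv (i + (i + d)) 2) 0 = -1 then none
      else some (PySem.List.pySetD (PySem.List.pySetD cells i (-1)) (i + d) (PySem.List.pyGetD cells i 0))) = some nb := h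
  split_ifs at h' with h1 h2
  all_goals (try simp_all)
  rw [← h']
  simp [PySem.List.length_pySetD]

theorem pvBacktrack_eq (initial : List Int) (mA : PySem.Dict (List Int) (List (Int × Int)))
    (cf : PySem.Dict (List Int) (List Int × (Int × Int))) (hInv : pvInv initial mA cf) :
    ∀ (fuel : Nat) (s : List Int) (p acc : List (Int × Int)),
      mA.get? s = some p → p.length < fuel → pvBacktrack initial cf fuel s acc = p ++ acc.reverse := by
  obtain ⟨h1, h3, h2, h4⟩ := hInv
  intro fuel
  induction fuel with
  | zero => intro s p acc _ hlt; omega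
  | succ f ih =>
    intro s p acc hs hlt
    by_cases hsi : s = initial
    · subst hsi
      rw [h1] at hs
      obtain rfl : ([] : List (Int × Int)) = p := by simpa using hs
      simp [pvBacktrack]
    · have hcont : mA.contains s = true := by
        rw [PySem.Dict.contains_eq_isSome_get?, hs]; rfl
      have hcf : cf.contains s = true := by
        rcases (h3 s).mp hcont with h | h
        · exact absurd h hsi
        · exact h
      have hcfs : ∃ pm, cf.get? s = some pm := by
        rw [PySem.Dict.contains_eq_isSome_get?] at hcf
        exact Option.isSome_iff_exists.mp hcf
      obtain ⟨pm, hpm⟩ := hcfs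
      obtain ⟨pl, hpl, hsl⟩ := h2 s pm hpm
      rw [hs] at hsl
      obtain rfl : p = pl ++ [pm.2] := by simpa using hsl
      rw [pvBacktrack, if_neg (by simp [hsi] : ¬((s == initial) = true)), hpm]
      have hrec := ih pm.1 pl (acc ++ [pm.2]) hpl (by simp at hlt; omega)
      exact hrec.trans (by simp)

theorem pvRange_len (length : Int) (cells : List Int) (hc : cells.length = length.toNat) :
    PySem.List.pyRange 0 length = PySem.List.pyRange 0 (cells.length : Int) := by
  by_cases h : 0 ≤ length
  · have : (cells.length : Int) = length := by omega
    rw [this]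
  · rw [PySem.List.pyRange_one_eq_nil (by omega), PySem.List.pyRange_one_eq_nil (by omega)]

theorem pvTryMove_eq (length : Int) (cells : List Int) (i d : Int) :
    pvTryMove length cells i d =
      if 0 ≤ i + d ∧ i + d < length ∧ PySem.List.pyGetD cells (i + d) 0 = -1 ∧
          ¬((d = 2 ∨ d = -2) ∧ PySem.List.pyGetD cells (PySem.Int.floordiv (i + (i + d)) 2) 0 = -1) then
        some (PySem.List.pySetD (PySem.List.pySetD cells i (-1)) (i + d) (PySem.List.pyGetD cells i 0))
      else none := by
  unfold pvTryMove
  show (if i + d < 0 ∨ length ≤ i + d ∨ PySem.List.pyGetD cells (i + d) 0 ≠ -1 then none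
      else if (d = 2 ∨ d = -2) ∧ PySem.List.pyGetD cells (PySem.Int.floordiv (i + (i + d)) 2) 0 = -1 then none
      else some (PySem.List.pySetD (PySem.List.pySetD cells i (-1)) (i + d) (PySem.List.pyGetD cells i 0))) = _
  split_ifs <;> first | rfl | omega

theorem pvFloordiv_two_right (i : Int) : PySem.Int.floordiv (i + (i + 2)) 2 = i + 1 := by
  simp [PySem.Int.floordiv, Int.fdiv_eq_ediv]; omega

theorem pvFloordiv_two_left (i : Int) : PySem.Int.floordiv (i + (i + -2)) 2 = i - 1 := by
  simp [PySem.Int.floordiv, Int.fdiv_eq_ediv]; omega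

theorem pvFilterMap_cons {α β : Type} (f : α → Option β) (a : α) (l : List α) :
    List.filterMap f (a :: l) = (f a).toList ++ List.filterMap f l := by
  cases h : f a <;> simp [h]

set_option maxHeartbeats 2000000 in
theorem pvCands_eq (length : Int) (cells : List Int) (hc : cells.length = length.toNat)
    (i : Int) (hi0 : 0 ≤ i) (hi : i < (cells.length : Int)) :
    (if i + 1 < length ∧ PySem.List.pyGetD cells (i + 1) 0 = -1 then
        [((i, i + 1), PySem.List.pySetD (PySem.List.pySetD cells i (-1)) (i + 1) (PySem.List.pyGetD cells i 0))] else []) ++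
    ((if 1 ≤ i ∧ PySem.List.pyGetD cells (i - 1) 0 = -1 then
        [((i, i - 1), PySem.List.pySetD (PySem.List.pySetD cells i (-1)) (i - 1) (PySem.List.pyGetD cells i 0))] else []) ++
    ((if i + 2 < length ∧ PySem.List.pyGetD cells (i + 1) 0 ≠ -1 ∧ PySem.List.pyGetD cells (i + 2) 0 = -1 then
        [((i, i + 2), PySem.List.pySetD (PySem.List.pySetD cells i (-1)) (i + 2) (PySem.List.pyGetD cells i 0))] else []) ++
    (if 2 ≤ i ∧ PySem.List.pyGetD cells (i - 1) 0 ≠ -1 ∧ PySem.List.pyGetD cells (i - 2) 0 = -1 then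
        [((i, i - 2), PySem.List.pySetD (PySem.List.pySetD cells i (-1)) (i - 2) (PySem.List.pyGetD cells i 0))] else []))) =
    pvCands length cells i := by
  simp only [pvCands, pvFilterMap_cons, List.filterMap_nil,
    pvTryMove_eq, pvFloordiv_two_right, pvFloordiv_two_left]
  simp only [show i + -1 = i - 1 from by ring, show i + -2 = i - 2 from by ring]
  split_ifs <;> simp_all <;> omega

theorem pvGN (length : Int) (cells : List Int) (hc : cells.length = length.toNat) :
    pvGetNeighborsA length cells = pvCandsAll length cells := by
  unfold pvGetNeighborsA pvCandsAll
  rw [PySem.List.enumerate_eq_map_pyRange cells 0, List.foldl_map]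
  rw [PySem.List.foldl_congr_mem _ _
    (fun acc j => acc ++ (if 0 ≤ PySem.List.pyGetD cells j 0 then pvCands length cells j else [])) _ ?_]
  · rw [PySem.List.foldl_append_eq_flatMap]
    simp [PySem.List.len]
  · intro acc j hj
    dsimp only
    rw [PySem.List.mem_pyRange_one] at hj
    have hj2 : j < (cells.length : Int) := by
      have := hj.2; simp [PySem.List.len] at this; exact this
    by_cases hcell : 0 ≤ PySem.List.pyGetD cells j 0
    · rw [if_pos hcell, ← pvCands_eq length cells hc j hj.1 hj2]
      simp only [if_pos hcell]
      split_ifs <;> simp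
    · rw [if_neg hcell]
      simp only [if_neg hcell]
      simp

theorem pvBN (length : Int) (initial current : List Int) (hc : current.length = length.toNat)
    (st : List (List Int) × PySem.Dict (List Int) (List Int × (Int × Int))) :
    (PySem.List.pyRange 0 length).foldl (fun st i =>
        if PySem.List.pyGetD current i 0 < 0 then st
        else [(1 : Int), -1, 2, -2].foldl (fun st d =>
          match pvTryMove length current i d with
          | none => st
          | some neighbor =>
            if st.2.contains neighbor = false ∧ neighbor ≠ initial then
              (st.1 ++ [neighbor], st.2.insert neighbor (current, (i, i + d)))
            else st) st) st =
    (pvCandsAll length current).foldl (pvStepB initial current) st := by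
  rw [pvRange_len length current hc]
  unfold pvCandsAll
  rw [List.foldl_flatMap]
  apply PySem.List.foldl_congr_mem
  intro st i _
  by_cases hcell : PySem.List.pyGetD current i 0 < 0
  · rw [if_pos hcell, if_neg (by omega)]
    simp
  · rw [if_neg hcell, if_pos (by omega)]
    unfold pvCands
    rw [List.foldl_filterMap]
    apply PySem.List.foldl_congr_mem
    intro st d _
    cases h : pvTryMove length current i d <;> simp only [h, Option.map_some, Option.map_none] <;> rfl

theorem pvCandsAll_len (length : Int) (cells : List Int) :
    ∀ x ∈ pvCandsAll length cells, x.2.length = cells.length := by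
  intro x hx
  simp only [pvCandsAll, List.mem_flatMap] at hx
  obtain ⟨i, _, hx⟩ := hx
  by_cases hcell : 0 ≤ PySem.List.pyGetD cells i 0
  · rw [if_pos hcell] at hx
    simp only [pvCands, List.mem_filterMap, Option.map_eq_some_iff] at hx
    obtain ⟨d, _, nb, hnb, rfl⟩ := hx
    exact pvTryMove_len length cells i d nb hnb
  · rw [if_neg hcell] at hx
    simp at hx

theorem pvSim (initial current : List Int) (ℓ : Nat) :
    ∀ (l : List ((Int × Int) × List Int)) (qA : List (List Int))
      (mA : PySem.Dict (List Int) (List (Int × Int))) (cf : PySem.Dict (List Int) (List Int × (Int × Int))),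
      pvInv initial mA cf → pvQInv ℓ mA qA → mA.contains current = true → (∀ x ∈ l, x.2.length = ℓ) →
      (l.foldl (pvStepB initial current) (qA.reverse, cf)).1 = (l.foldl (pvStepA current) (qA, mA)).1.reverse
      ∧ pvInv initial (l.foldl (pvStepA current) (qA, mA)).2 (l.foldl (pvStepB initial current) (qA.reverse, cf)).2
      ∧ pvQInv ℓ (l.foldl (pvStepA current) (qA, mA)).2 (l.foldl (pvStepA current) (qA, mA)).1
      ∧ (l.foldl (pvStepA current) (qA, mA)).2.contains current = true := by
  intro l
  induction l with
  | nil =>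
    intro qA mA cf hInv hQ hcur _
    exact ⟨rfl, hInv, hQ, hcur⟩
  | cons x l ih =>
    intro qA mA cf hInv hQ hcur hlen
    obtain ⟨h1, h3, h2, h4⟩ := hInv
    simp only [List.foldl_cons]
    by_cases hA : mA.contains x.2 = true
    · -- already discovered on the A side: both sides skip this neighbor
      have hBskip : ¬ (cf.contains x.2 = false ∧ x.2 ≠ initial) := by
        rcases (h3 x.2).mp hA with h | h
        · intro hcon; exact hcon.2 h
        · intro hcon; rw [hcon.1] at h; exact Bool.false_ne_true h
      rw [show pvStepA current (qA, mA) x = (qA, mA) from by simp [pvStepA, hA]]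
      rw [show pvStepB initial current (qA.reverse, cf) x = (qA.reverse, cf) from by
        simp only [pvStepB]; rw [if_neg hBskip]]
      exact ih qA mA cf ⟨h1, h3, h2, h4⟩ hQ hcur (fun y hy => hlen y (List.mem_cons_of_mem _ hy))
    · -- newly discovered: both sides enqueue and record it
      have hAx : mA.contains x.2 = false := by
        cases hx : mA.contains x.2
        · rfl
        · exact absurd hx hA
      have hmnone : mA.get? x.2 = none := (PySem.Dict.get?_eq_none_iff_contains mA x.2).mpr hAx
      have hxinit : x.2 ≠ initial := by
        intro he
        rw [he, PySem.Dict.contains_eq_isSome_get?, h1] at hAx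
        simp at hAx
      have hcf : cf.contains x.2 = false := by
        cases hx : cf.contains x.2
        · rfl
        · exact absurd ((h3 x.2).mpr (Or.inr hx)) hA
      obtain ⟨pc, hpc⟩ : ∃ pc, mA.get? current = some pc := by
        rw [PySem.Dict.contains_eq_isSome_get?] at hcur
        exact Option.isSome_iff_exists.mp hcur
      have hgetD : mA.getD current [] = pc := by
        rw [PySem.Dict.getD_eq_get?_getD, hpc]; rfl
      have hcx : current ≠ x.2 := by
        intro he; rw [← he, hpc] at hmnone; exact Option.some_ne_none _ hmnone
      rw [show pvStepA current (qA, mA) x =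
            (x.2 :: qA, mA.insert x.2 (mA.getD current [] ++ [x.1])) from by
        simp [pvStepA, hAx, pvInsert_zero]]
      rw [show pvStepB initial current (qA.reverse, cf) x =
            ((x.2 :: qA).reverse, cf.insert x.2 (current, x.1)) from by
        simp [pvStepB, hcf, hxinit]]
      apply ih
      · -- the invariant survives a parallel insertion
        refine ⟨?_, ?_, ?_, ?_⟩
        · rw [PySem.Dict.get?_insert_of_ne _ _ (Ne.symm hxinit), h1]
        · intro s
          rw [PySem.Dict.contains_insert, PySem.Dict.contains_insert]
          simp only [Bool.or_eq_true, beq_iff_eq]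
          constructor
          · rintro (h | h)
            · exact Or.inr (Or.inl h)
            · rcases (h3 s).mp h with h' | h'
              · exact Or.inl h'
              · exact Or.inr (Or.inr h')
          · rintro (h | h | h)
            · exact Or.inr ((h3 s).mpr (Or.inl h))
            · exact Or.inl h
            · exact Or.inr ((h3 s).mpr (Or.inr h))
        · intro s pm hgs
          rw [PySem.Dict.get?_insert] at hgs
          by_cases hs : s = x.2
          · rw [if_pos hs] at hgs
            obtain rfl : pm = (current, x.1) := by simpa using hgs.symm
            refine ⟨pc, ?_, ?_⟩
            · rw [PySem.Dict.get?_insert_of_ne _ _ hcx]; exact hpc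
            · rw [hs, PySem.Dict.get?_insert_self, hgetD]
          · rw [if_neg hs] at hgs
            obtain ⟨pl, hp1, hp2⟩ := h2 s pm hgs
            have hpm1 : pm.1 ≠ x.2 := by
              intro he; rw [he, hmnone] at hp1; exact (Option.some_ne_none _ hp1.symm)
            exact ⟨pl, by rw [PySem.Dict.get?_insert_of_ne _ _ hpm1]; exact hp1,
                       by rw [PySem.Dict.get?_insert_of_ne _ _ hs]; exact hp2⟩
        · intro s pl hgs
          rw [PySem.Dict.size_insert, hcf, if_neg (by simp)]
          rw [PySem.Dict.get?_insert] at hgs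
          by_cases hs : s = x.2
          · rw [if_pos hs] at hgs
            obtain rfl : pl = mA.getD current [] ++ [x.1] := by simpa using hgs.symm
            rw [hgetD]
            have := h4 current pc hpc
            simp; omega
          · rw [if_neg hs] at hgs
            have := h4 s pl hgs
            omega
      · -- queue invariant
        intro s hs
        rcases List.mem_cons.mp hs with rfl | hs'
        · refine ⟨?_, hlen x List.mem_cons_self⟩
          rw [PySem.Dict.contains_insert]; simp
        · obtain ⟨hc', hl'⟩ := hQ s hs'
          refine ⟨?_, hl'⟩
          rw [PySem.Dict.contains_insert, hc']; simp
      · rw [PySem.Dict.contains_insert, hcur]; simp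
      · exact fun y hy => hlen y (List.mem_cons_of_mem _ hy)

theorem pvMain (length : Int) (initial goal : List Int) :
    ∀ (fuel : Nat) (qA : List (List Int)) (mA : PySem.Dict (List Int) (List (Int × Int)))
      (cf : PySem.Dict (List Int) (List Int × (Int × Int))),
      pvInv initial mA cf → pvQInv length.toNat mA qA →
      pvLoopA length goal fuel qA mA = pvLoopB length initial goal fuel qA.reverse cf := by
  intro fuel
  induction fuel with
  | zero => intro qA mA cf _ _; rfl
  | succ f ih =>
    intro qA mA cf hInv hQ
    rcases eq_or_ne qA [] with rfl | hne
    · rfl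
    · have hdec : qA.dropLast ++ [qA.getLast hne] = qA := List.dropLast_append_getLast hne
      have hpop : PySem.List.pop? qA = some (qA.getLast hne, qA.dropLast) := by
        have := PySem.List.pop?_last qA.dropLast (qA.getLast hne)
        rw [hdec] at this
        exact this
      have hrev : qA.reverse = qA.getLast hne :: qA.dropLast.reverse := by
        conv_lhs => rw [← hdec]
        simp
      obtain ⟨hcur, hlencur⟩ := hQ (qA.getLast hne) (List.getLast_mem hne)
      rw [pvLoopA, hpop, hrev, pvLoopB]
      dsimp only
      by_cases hg : qA.getLast hne = goal
      · have hgb : (qA.getLast hne == goal) = true := by simp [hg]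
        rw [if_pos hgb, if_pos hgb]
        obtain ⟨pc, hpc⟩ : ∃ pc, mA.get? (qA.getLast hne) = some pc := by
          rw [PySem.Dict.contains_eq_isSome_get?] at hcur
          exact Option.isSome_iff_exists.mp hcur
        have hlt : pc.length < cf.size + 1 := by
          have := hInv.2.2.2 _ pc hpc
          omega
        rw [pvBacktrack_eq initial mA cf hInv (cf.size + 1) (qA.getLast hne) pc [] hpc hlt]
        rw [PySem.Dict.getD_eq_get?_getD, hpc]
        simp
      · have hgb : ¬((qA.getLast hne == goal) = true) := by simp [hg]
        rw [if_neg hgb, if_neg hgb]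
        have hstepA : (fun (st : List (List Int) × PySem.Dict (List Int) (List (Int × Int))) mn =>
            if st.2.contains mn.2 = false then
              (PySem.List.insert st.1 0 mn.2, st.2.insert mn.2 (st.2.getD (qA.getLast hne) [] ++ [mn.1]))
            else st) = pvStepA (qA.getLast hne) := rfl
        rw [hstepA, pvGN length (qA.getLast hne) hlencur]
        rw [pvBN length initial (qA.getLast hne) hlencur (qA.dropLast.reverse, cf)]
        have hQ2 : pvQInv length.toNat mA qA.dropLast :=
          fun s hs => hQ s ((List.dropLast_sublist qA).mem hs)
        have hlens : ∀ x ∈ pvCandsAll length (qA.getLast hne), x.2.length = length.toNat := by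
          intro x hx
          rw [pvCandsAll_len length (qA.getLast hne) x hx, hlencur]
        obtain ⟨hq, hinv2, hqinv2, hcur2⟩ :=
          pvSim initial (qA.getLast hne) length.toNat (pvCandsAll length (qA.getLast hne))
            qA.dropLast mA cf hInv hQ2 hcur hlens
        rw [hq]
        exact ih _ _ _ hinv2 hqinv2

-- ===== VERDICT (by name: the statement is the Claim_ definition above) =====
theorem pvInv_init (initial : List Int) :
    pvInv initial (PySem.Dict.empty.insert initial []) PySem.Dict.empty := by
  refine ⟨PySem.Dict.get?_insert_self _ _ _, ?_, ?_, ?_⟩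
  · intro s
    rw [PySem.Dict.contains_insert]
    simp only [PySem.Dict.contains_empty, Bool.or_false, beq_iff_eq, Bool.false_eq_true, or_false]
  · intro s pm h
    rw [PySem.Dict.get?_empty] at h
    exact (Option.some_ne_none _ h.symm).elim
  · intro s pl h
    rw [PySem.Dict.get?_insert] at h
    by_cases hs : s = initial
    · rw [if_pos hs] at h
      obtain rfl : pl = [] := by simpa using h.symm
      simp
    · rw [if_neg hs, PySem.Dict.get?_empty] at h
      exact absurd h.symm (Option.some_ne_none _)

theorem solve_disks_spec : Claim_equal_solve_disks := by
  intro length num_disks distinct _ _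
  unfold Spec_solve_disks solve_disks solve_disks_alt
  have hinit : pvInitialB length num_disks distinct = pvInitialA length num_disks distinct := rfl
  have hfuel : pvFuelB length = pvFuelA length := rfl
  rw [hinit, hfuel]
  dsimp only
  have hlen : (pvInitialA length num_disks distinct).length = length.toNat := by
    simp [pvInitialA, PySem.List.length_pyRange_one]
  have hQ : pvQInv length.toNat (PySem.Dict.empty.insert (pvInitialA length num_disks distinct) [])
      [pvInitialA length num_disks distinct] := by
    intro s hs
    rcases List.mem_singleton.mp hs with rfl
    exact ⟨PySem.Dict.contains_insert_self _ _ _, hlen⟩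
  have hmain := pvMain length (pvInitialA length num_disks distinct)
      (pvInitialA length num_disks distinct).reverse
      (pvFuelA length) [pvInitialA length num_disks distinct]
      (PySem.Dict.empty.insert (pvInitialA length num_disks distinct) [])
      PySem.Dict.empty (pvInv_init _) hQ
  rw [show ([pvInitialA length num_disks distinct] : List (List Int)).reverse =
      [pvInitialA length num_disks distinct] from rfl] at hmain
  rw [hmain]
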